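-- pv_equiv track=rewrite | github.com/ccctw-ma/leetcode | src/Medium/ArrayTest/numSubarrayBoundedMax.py | numSubarrayBoundedMax2
-- ===== SOURCE A (Python) =====
-- from typing import List, Tuple, Union, Optional
--
-- def numSubarrayBoundedMax2(nums: List[int], left: int, right: int) -> int:
--     mn = tar = l = r = 0
--     for x in nums:
--         if x < left:
--             mn += 1
--             l += mn
--         else:
--             mn = 0
--         if x <= right:
--             tar += 1
--             r += tar
--         else:
--             tar = 0
--     return r - l
-- ===== SOURCE B (Python) =====
-- def numSubarrayBoundedMax2(nums, left, right):
--     def count(pred):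
--         # number of subarrays all of whose elements satisfy pred:
--         # sum of run*(run+1)//2 over maximal runs of satisfying elements
--         total = run = 0
--         for x in nums:
--             if pred(x):
--                 run += 1
--             else:
--                 total += run * (run + 1) // 2
--                 run = 0
--         return total + run * (run + 1) // 2
--     return count(lambda x: x <= right) - count(lambda x: x < left)
-- ===== Notes on version B (the rewrite author's own statement) =====
-- stated objective: alternative
-- what changed: B counts subarrays with all elements <= bound via a helper that detects maximal runs and adds a closed-form triangular count run*(run+1)//2 per run, returning count(right) - count(left-1) (as x < left), instead of A's single fused loop maintaining two incremental per-element counters.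
import Mathlib
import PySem

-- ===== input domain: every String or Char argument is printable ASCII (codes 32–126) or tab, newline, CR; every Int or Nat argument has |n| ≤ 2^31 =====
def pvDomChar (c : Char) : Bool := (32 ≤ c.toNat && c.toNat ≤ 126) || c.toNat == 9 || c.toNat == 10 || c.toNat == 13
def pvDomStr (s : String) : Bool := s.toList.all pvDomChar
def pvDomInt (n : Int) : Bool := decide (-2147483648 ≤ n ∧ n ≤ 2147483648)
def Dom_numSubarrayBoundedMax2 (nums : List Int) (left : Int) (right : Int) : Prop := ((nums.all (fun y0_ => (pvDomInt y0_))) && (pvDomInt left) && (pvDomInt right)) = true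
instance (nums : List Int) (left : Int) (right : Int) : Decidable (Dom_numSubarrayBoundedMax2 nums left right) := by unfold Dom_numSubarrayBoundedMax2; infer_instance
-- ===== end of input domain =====

-- B replaces A's fused per-element incremental counters with a run-detection helper
-- adding a closed-form triangular count per maximal run (alternative decomposition, same cost).

-- ===== PORT A =====
-- one loop, four state variables (mn, tar, l, r), exactly as the Python
def numSubarrayBoundedMax2 (nums : List Int) (left : Int) (right : Int) : Int :=
  let s := nums.foldl (fun (s : Int × Int × Int × Int) x =>
    let mn := s.1; let tar := s.2.1; let l := s.2.2.1; let r := s.2.2.2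
    let ml := if x < left then (mn + 1, l + (mn + 1)) else (0, l)
    let tr := if x ≤ right then (tar + 1, r + (tar + 1)) else (0, r)
    (ml.1, tr.1, ml.2, tr.2)) (0, 0, 0, 0)
  s.2.2.2 - s.2.2.1

-- ===== PORT B =====
-- helper count(pred): scan keeping (run, total); on a failing element flush run*(run+1)//2
def pvCount (pred : Int → Bool) (nums : List Int) : Int :=
  let s := nums.foldl (fun (s : Int × Int) x =>
    if pred x then (s.1 + 1, s.2)
    else (0, s.2 + PySem.Int.floordiv (s.1 * (s.1 + 1)) 2)) (0, 0)
  s.2 + PySem.Int.floordiv (s.1 * (s.1 + 1)) 2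

def numSubarrayBoundedMax2_alt (nums : List Int) (left : Int) (right : Int) : Int :=
  pvCount (fun x => x ≤ right) nums - pvCount (fun x => x < left) nums

-- ===== PRECONDITION & SPEC =====
def Spec_numSubarrayBoundedMax2 (nums : List Int) (left : Int) (right : Int) (out : Int) : Prop := out = numSubarrayBoundedMax2_alt nums left right
instance (nums : List Int) (left : Int) (right : Int) (out : Int) : Decidable (Spec_numSubarrayBoundedMax2 nums left right out) := by unfold Spec_numSubarrayBoundedMax2; infer_instance

-- ===== CLAIM (what is proved, stated in full; the proofs are below) =====
def Claim_equal_numSubarrayBoundedMax2 : Prop := ∀ (nums : List Int) (left : Int) (right : Int), Dom_numSubarrayBoundedMax2 nums left right → Spec_numSubarrayBoundedMax2 nums left right (numSubarrayBoundedMax2 nums left right)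

-- ===== LEMMAS AND PROOFS =====

-- triangular number as B computes it
def pvTri (n : Int) : Int := PySem.Int.floordiv (n * (n + 1)) 2

theorem pvfd2 (k : Int) : PySem.Int.floordiv (2 * k) 2 = k := by
  rw [PySem.Int.floordiv_eq_iff_of_pos (by norm_num)]
  constructor <;> nlinarith

theorem pvTri_succ (n : Int) : pvTri (n + 1) = pvTri n + (n + 1) := by
  obtain ⟨k, hk⟩ := Int.even_mul_succ_self n
  have h1 : n * (n + 1) = 2 * k := by linarith
  have h2 : (n + 1) * (n + 1 + 1) = 2 * (k + (n + 1)) := by linear_combination hk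
  unfold pvTri
  rw [h1, h2, pvfd2, pvfd2]

-- A's per-predicate step (state (count, acc)) vs B's step (state (run, total))
def pvAStep (p : Int → Bool) (s : Int × Int) (x : Int) : Int × Int :=
  if p x then (s.1 + 1, s.2 + (s.1 + 1)) else (0, s.2)

def pvBStep (p : Int → Bool) (s : Int × Int) (x : Int) : Int × Int :=
  if p x then (s.1 + 1, s.2) else (0, s.2 + PySem.Int.floordiv (s.1 * (s.1 + 1)) 2)

-- invariant: A's acc = B's total + tri(run), and the counts coincide
theorem pvFold_rel (p : Int → Bool) (nums : List Int) :
    ∀ (run total : Int),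
      nums.foldl (pvAStep p) (run, total + pvTri run)
        = ((nums.foldl (pvBStep p) (run, total)).1,
           (nums.foldl (pvBStep p) (run, total)).2
             + pvTri (nums.foldl (pvBStep p) (run, total)).1) := by
  induction nums with
  | nil => intro run total; simp
  | cons x xs ih =>
    intro run total
    by_cases h : p x = true
    · have ha : pvAStep p (run, total + pvTri run) x
          = (run + 1, total + pvTri (run + 1)) := by
        simp [pvAStep, h, pvTri_succ]; ring
      have hb : pvBStep p (run, total) x = (run + 1, total) := by simp [pvBStep, h]
      simp only [List.foldl_cons, ha, hb, ih]
    · have ha : pvAStep p (run, total + pvTri run) x = (0, total + pvTri run) := by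
        simp [pvAStep, h]
      have hb : pvBStep p (run, total) x = (0, total + pvTri run) := by
        simp [pvBStep, h, pvTri]
      have := ih 0 (total + pvTri run)
      simp only [List.foldl_cons, ha, hb]
      have h0 : (0 : Int) = 0 + pvTri 0 := by simp [pvTri, PySem.Int.floordiv]
      calc xs.foldl (pvAStep p) (0, total + pvTri run)
          = xs.foldl (pvAStep p) (0, (total + pvTri run) + pvTri 0) := by
            simp [pvTri, PySem.Int.floordiv]
        _ = _ := by rw [ih 0 (total + pvTri run)]

-- per-predicate value of B's helper equals A's per-predicate accumulator
theorem pvCount_eq (p : Int → Bool) (nums : List Int) :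
    pvCount p nums = (nums.foldl (pvAStep p) (0, 0)).2 := by
  have h := pvFold_rel p nums 0 0
  have h0 : (0 : Int) + pvTri 0 = 0 := by simp [pvTri, PySem.Int.floordiv]
  rw [h0] at h
  show (nums.foldl (pvBStep p) (0, 0)).2
      + PySem.Int.floordiv ((nums.foldl (pvBStep p) (0, 0)).1
          * ((nums.foldl (pvBStep p) (0, 0)).1 + 1)) 2
    = (nums.foldl (pvAStep p) (0, 0)).2
  rw [h]
  rfl

-- A's fused quad-state fold splits into the two independent pair folds
theorem pvQuad_split (left right : Int) (nums : List Int) :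
    ∀ (mn tar l r : Int),
      nums.foldl (fun (s : Int × Int × Int × Int) x =>
        let mn := s.1; let tar := s.2.1; let l := s.2.2.1; let r := s.2.2.2
        let ml := if x < left then (mn + 1, l + (mn + 1)) else (0, l)
        let tr := if x ≤ right then (tar + 1, r + (tar + 1)) else (0, r)
        (ml.1, tr.1, ml.2, tr.2)) (mn, tar, l, r)
      = ((nums.foldl (pvAStep (fun x => x < left)) (mn, l)).1,
         (nums.foldl (pvAStep (fun x => x ≤ right)) (tar, r)).1,
         (nums.foldl (pvAStep (fun x => x < left)) (mn, l)).2,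
         (nums.foldl (pvAStep (fun x => x ≤ right)) (tar, r)).2) := by
  induction nums with
  | nil => intro mn tar l r; simp
  | cons x xs ih =>
    intro mn tar l r
    simp only [List.foldl_cons]
    rw [show (let mn' := mn; let tar' := tar; let l' := l; let r' := r;
        let ml := if x < left then (mn' + 1, l' + (mn' + 1)) else (0, l');
        let tr := if x ≤ right then (tar' + 1, r' + (tar' + 1)) else (0, r');
        ((ml.1, tr.1, ml.2, tr.2) : Int × Int × Int × Int))
      = ((pvAStep (fun x => x < left) (mn, l) x).1,
         (pvAStep (fun x => x ≤ right) (tar, r) x).1,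
         (pvAStep (fun x => x < left) (mn, l) x).2,
         (pvAStep (fun x => x ≤ right) (tar, r) x).2) from by
        simp only [pvAStep]; split_ifs <;> simp_all <;> omega]
    rw [ih]

-- ===== VERDICT (by name: the statement is the Claim_ definition above) =====
theorem numSubarrayBoundedMax2_spec : Claim_equal_numSubarrayBoundedMax2 := by
  intro nums left right _
  show numSubarrayBoundedMax2 nums left right = numSubarrayBoundedMax2_alt nums left right
  unfold numSubarrayBoundedMax2 numSubarrayBoundedMax2_alt
  rw [pvQuad_split left right nums 0 0 0 0, pvCount_eq, pvCount_eq]
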